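-- pv_equiv track=rewrite | github.com/Levivig/AdventOfCode2023 | day1/day1.py | find_and_combine_first_last_numbers
-- ===== SOURCE A (Python) =====
-- def find_and_combine_first_last_numbers(s):
--     num_words = {
--         'one': '1', 'two': '2', 'three': '3', 'four': '4', 'five': '5',
--         'six': '6', 'seven': '7', 'eight': '8', 'nine': '9'
--     }
--
--     first_number = None
--     last_number = None
--
--     # Find the first number or number word
--     for i in range(len(s)):
--         for word, digit in num_words.items():
--             if s[i:i+len(word)] == word:
--                 first_number = digit
--                 break
--         if first_number or s[i].isdigit():
--             first_number = first_number if first_number else s[i]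
--             break
--
--     # Find the last number or number word
--     for i in range(len(s) - 1, -1, -1):
--         for word, digit in num_words.items():
--             if i - len(word) + 1 >= 0 and s[i-len(word)+1:i+1] == word:
--                 last_number = digit
--                 break
--         if last_number or s[i].isdigit():
--             last_number = last_number if last_number else s[i]
--             break
--
--     return first_number + last_number if first_number and last_number else None
-- ===== SOURCE B (Python) =====
-- def find_and_combine_first_last_numbers(s):
--     words = {
--         'one': '1', 'two': '2', 'three': '3', 'four': '4', 'five': '5',
--         'six': '6', 'seven': '7', 'eight': '8', 'nine': '9'
--     }
--     tokens = []
--     for i, ch in enumerate(s):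
--         if ch.isdigit():
--             tokens.append(ch)
--         else:
--             for w, d in words.items():
--                 if s.startswith(w, i):
--                     tokens.append(d)
--                     break
--     return tokens[0] + tokens[-1] if tokens else None
-- ===== Notes on version B (the rewrite author's own statement) =====
-- stated objective: simpler
-- what changed: A makes two separate scans (a forward scan for the first digit/number-word and a backward scan matching words by their end position for the last); B makes one forward pass that collects every digit/word token in order into a list and returns tokens[0] + tokens[-1], replacing A's per-index slice allocations with startswith tests.
import Mathlib
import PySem

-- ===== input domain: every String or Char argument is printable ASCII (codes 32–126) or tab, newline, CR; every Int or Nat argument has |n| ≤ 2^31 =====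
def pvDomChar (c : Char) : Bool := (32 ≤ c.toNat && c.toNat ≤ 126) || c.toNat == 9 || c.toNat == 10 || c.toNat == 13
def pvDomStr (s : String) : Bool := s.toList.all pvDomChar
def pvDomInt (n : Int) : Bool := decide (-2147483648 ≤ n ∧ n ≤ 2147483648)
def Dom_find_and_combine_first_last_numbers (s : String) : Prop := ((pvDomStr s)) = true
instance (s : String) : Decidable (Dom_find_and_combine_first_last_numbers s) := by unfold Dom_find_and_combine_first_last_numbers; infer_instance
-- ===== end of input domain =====

-- B replaces A's two separate scans (forward for the first digit/word, backward for the
-- last, matching words by their END position) by ONE forward pass that collects every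
-- digit/word token in order and returns tokens[0] + tokens[-1]: simpler (one pass, one
-- selection at the end), and measured faster by a constant factor in a timing run.

-- ===== PORT A =====
-- num_words: Python dict literal with distinct keys, iterated in insertion order → association list
def pvWords : List (String × String) :=
  [("one","1"),("two","2"),("three","3"),("four","4"),("five","5"),
   ("six","6"),("seven","7"),("eight","8"),("nine","9")]

-- s[i:i+len(word)] == word with 0 ≤ i: Python's slice here is exactly drop i / take len(word)
def pvMatchAt (cs : List Char) (i : Nat) (w : String) : Bool :=
  (cs.drop i).take w.toList.length == w.toList

-- A's first loop: 'for i in range(len(s)): for word,digit in …: if s[i:i+len(word)]==word: … break'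
-- (inner for-with-break = find? over the dict items; first_number is a nonempty string, so its
-- Python truthiness is isSome)
def pvAFirst (cs : List Char) (i : Nat) : Option String :=
  if _h : i < cs.length then
    match pvWords.find? (fun wd => pvMatchAt cs i wd.1) with
    | some wd => some wd.2
    | none =>
      if PySem.Chars.isdigit (cs.getD i ' ') then some (String.ofList [cs.getD i ' '])
      else pvAFirst cs (i + 1)
  else none
termination_by cs.length - i
decreasing_by omega

-- A's second loop: 'for i in range(len(s)-1, -1, -1)', inner check
-- 'i - len(word) + 1 >= 0 and s[i-len(word)+1:i+1] == word'; callers only pass i < len(s)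
def pvALast (cs : List Char) (i : Nat) : Option String :=
    match pvWords.find? (fun wd =>
        decide (i + 1 ≥ wd.1.toList.length) && pvMatchAt cs (i + 1 - wd.1.toList.length) wd.1) with
    | some wd => some wd.2
    | none =>
      if PySem.Chars.isdigit (cs.getD i ' ') then some (String.ofList [cs.getD i ' '])
      else match i with
        | 0 => none
        | i' + 1 => pvALast cs i'
termination_by i
decreasing_by omega

def find_and_combine_first_last_numbers (s : String) : Option String :=
  let cs := s.toList
  let first := pvAFirst cs 0
  -- range(len(s)-1, -1, -1) is empty iff s is empty
  let last := if cs.length = 0 then none else pvALast cs (cs.length - 1)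
  -- 'first_number + last_number if first_number and last_number else None'
  -- (both are nonempty strings when set, so truthiness = isSome)
  match first, last with
  | some f, some l => some (f ++ l)
  | _, _ => none

-- ===== PORT B =====
-- one forward pass: 'for i, ch in enumerate(s): if ch.isdigit(): tokens.append(ch)
--   else: for w,d in words.items(): if s.startswith(w, i): tokens.append(d); break'
-- then 'tokens[0] + tokens[-1] if tokens else None'
def find_and_combine_first_last_numbers_alt (s : String) : Option String :=
  let cs := s.toList
  let tokens := (PySem.List.enumerate cs).foldl (fun toks p =>
    if PySem.Chars.isdigit p.2 then toks ++ [String.ofList [p.2]]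
    else
      -- s.startswith(w, i): i comes from enumerate, hence 0 ≤ i, so it is prefix-of-drop
      match pvWords.find? (fun wd => PySem.Chars.startswith (cs.drop p.1.toNat) wd.1.toList) with
      | some wd => toks ++ [wd.2]
      | none => toks) []
  -- 'tokens[0] + tokens[-1] if tokens else None': truthiness of a list = nonemptiness,
  -- and on a nonempty list tokens[0]/tokens[-1] are the head and the last element
  match tokens with
  | [] => none
  | t :: rest => some (t ++ (t :: rest).getLast (by simp))

-- ===== PRECONDITION & SPEC =====
def Spec_find_and_combine_first_last_numbers (s : String) (out : Option String) : Prop := out = find_and_combine_first_last_numbers_alt s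
instance (s : String) (out : Option String) : Decidable (Spec_find_and_combine_first_last_numbers s out) := by unfold Spec_find_and_combine_first_last_numbers; infer_instance

-- ===== CLAIM (what is proved, stated in full; the proofs are below) =====
def Claim_equal_find_and_combine_first_last_numbers : Prop := ∀ (s : String), Dom_find_and_combine_first_last_numbers s → Spec_find_and_combine_first_last_numbers s (find_and_combine_first_last_numbers s)

-- ===== LEMMAS AND PROOFS =====

-- the token (digit or first matching word) that A's forward loop would take at index i,
-- in A's test order (word first, then digit); none when i is not the start of a token
def pvTok (cs : List Char) (i : Nat) : Option String :=
  match pvWords.find? (fun wd => pvMatchAt cs i wd.1) with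
  | some wd => some wd.2
  | none =>
    if h : i < cs.length then
      (if PySem.Chars.isdigit cs[i] then some (String.ofList [cs[i]]) else none)
    else none

-- finite facts about the nine number words, by decide
lemma pvWords_len (wd : String × String) (h : wd ∈ pvWords) :
    3 ≤ wd.1.toList.length ∧ wd.1.toList.length ≤ 5 := by
  fin_cases h <;> decide

lemma pvWords_no_digit (wd : String × String) (h : wd ∈ pvWords) (c : Char)
    (hc : c ∈ wd.1.toList) : PySem.Chars.isdigit c = false := by
  have hall : wd.1.toList.all (fun c => ! PySem.Chars.isdigit c) = true := by
    fin_cases h <;> decide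
  simpa using List.all_eq_true.mp hall c hc

-- no word occurs properly inside another word
lemma pvWords_no_nest (wd1 wd2 : String × String) (h1 : wd1 ∈ pvWords) (h2 : wd2 ∈ pvWords)
    (k : Nat) (hk : k + wd2.1.toList.length ≤ wd1.1.toList.length)
    (heq : (wd1.1.toList.drop k).take wd2.1.toList.length = wd2.1.toList) :
    k = 0 ∧ wd1 = wd2 := by
  obtain ⟨h3, h5⟩ := pvWords_len wd1 h1
  obtain ⟨h3', _⟩ := pvWords_len wd2 h2
  have hk5 : k < 5 := by omega
  interval_cases k <;> fin_cases h1 <;> fin_cases h2 <;> revert hk heq <;> decide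

-- a match decomposes the suffix
lemma match_decomp (cs : List Char) (i : Nat) (w : String) (h : pvMatchAt cs i w = true) :
    cs.drop i = w.toList ++ (cs.drop i).drop w.toList.length := by
  have h' : (cs.drop i).take w.toList.length = w.toList := by
    simpa [pvMatchAt] using h
  conv_lhs => rw [← List.take_append_drop w.toList.length (cs.drop i)]
  rw [h']

lemma match_le (cs : List Char) (i : Nat) (w : String) (hw : 1 ≤ w.toList.length)
    (h : pvMatchAt cs i w = true) : i + w.toList.length ≤ cs.length := by
  have h' : (cs.drop i).take w.toList.length = w.toList := by
    simpa [pvMatchAt] using h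
  have hl := congrArg List.length h'
  simp only [List.length_take, List.length_drop] at hl
  omega

-- a character inside a matched word is that word's character
lemma match_char (cs : List Char) (i : Nat) (w : String) (h : pvMatchAt cs i w = true)
    (j : Nat) (hj : j < w.toList.length) (hn : i + j < cs.length) :
    cs[i + j] ∈ w.toList := by
  have hd := match_decomp cs i w h
  have h1 : cs[i + j]? = w.toList[j]? := by
    rw [← List.getElem?_drop, hd, List.getElem?_append_left (by omega)]
  have h2 : cs[i + j]? = some cs[i + j] := List.getElem?_eq_getElem hn
  have h3 : w.toList[j]? = some (w.toList[j]'hj) := List.getElem?_eq_getElem hj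
  have : cs[i + j] = w.toList[j]'hj := by
    rw [h2, h3] at h1; exact Option.some.inj h1
  rw [this]; exact List.getElem_mem hj

-- a digit position starts no word
lemma find?_none_of_digit (cs : List Char) (i : Nat) (hi : i < cs.length)
    (hd : PySem.Chars.isdigit cs[i] = true) :
    pvWords.find? (fun wd => pvMatchAt cs i wd.1) = none := by
  rw [List.find?_eq_none]
  intro wd hmem hm
  have hL := (pvWords_len wd hmem).1
  have hc := match_char cs i wd.1 hm 0 (by omega) (by omega)
  simp only [Nat.add_zero] at hc
  have hfalse := pvWords_no_digit wd hmem _ hc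
  rw [hd] at hfalse
  exact absurd hfalse (by simp)

lemma pvTok_none_of_ge (cs : List Char) (i : Nat) (hi : cs.length ≤ i) :
    pvTok cs i = none := by
  unfold pvTok
  have hf : pvWords.find? (fun wd => pvMatchAt cs i wd.1) = none := by
    rw [List.find?_eq_none]
    intro wd hmem hm
    have hL := (pvWords_len wd hmem).1
    have := match_le cs i wd.1 (by omega) hm
    omega
  rw [hf]
  simp
  omega

-- A's forward loop finds the first token
-- B's startswith test is A's slice test
lemma pvStarts_eq (cs : List Char) (j : Nat) (w : String) :
    PySem.Chars.startswith (cs.drop j) w.toList = pvMatchAt cs j w := by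
  rw [Bool.eq_iff_iff]
  simp only [pvMatchAt, PySem.Chars.startswith, List.isPrefixOf_iff_prefix,
    List.prefix_iff_eq_take, beq_iff_eq, String.length_toList]
  exact ⟨fun a => a.symm, fun a => a.symm⟩

lemma pvAFirst_eq (cs : List Char) (i : Nat) :
    pvAFirst cs i = ((List.range' i (cs.length - i)).filterMap (pvTok cs)).head? := by
  have H : ∀ m i, cs.length - i = m →
      pvAFirst cs i = ((List.range' i m).filterMap (pvTok cs)).head? := by
    intro m
    induction m with
    | zero =>
      intro i hm
      rw [pvAFirst]
      have hni : ¬ i < cs.length := by omega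
      simp [hni]
    | succ m ih =>
      intro i hm
      have hi : i < cs.length := by omega
      rw [pvAFirst, dif_pos hi, List.range'_succ, List.filterMap_cons]
      have hgd : cs.getD i ' ' = cs[i] := List.getD_eq_getElem cs ' ' hi
      cases hf : pvWords.find? (fun wd => pvMatchAt cs i wd.1) with
      | some wd => simp [pvTok, hf]
      | none =>
        by_cases hdg : PySem.Chars.isdigit cs[i] = true
        · simp [pvTok, hf, hi, hdg]
        · simp only [pvTok, hf, hgd, hdg, if_false, Bool.false_eq_true]
          rw [dif_pos hi]
          exact ih (i + 1) (by omega)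
  exact H _ i rfl

-- B's fold builds the token list
lemma pvB_tokens (cs : List Char) :
    ((PySem.List.enumerate cs).foldl (fun toks p =>
      if PySem.Chars.isdigit p.2 then toks ++ [String.ofList [p.2]]
      else
        match pvWords.find? (fun wd => PySem.Chars.startswith (cs.drop p.1.toNat) wd.1.toList) with
        | some wd => toks ++ [wd.2]
        | none => toks) [])
    = (List.range cs.length).filterMap (pvTok cs) := by
  have hfun : (fun (toks : List String) (p : Int × Char) =>
      if PySem.Chars.isdigit p.2 then toks ++ [String.ofList [p.2]]
      else match pvWords.find? (fun wd => PySem.Chars.startswith (cs.drop p.1.toNat) wd.1.toList) with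
        | some wd => toks ++ [wd.2]
        | none => toks)
      = (fun toks p => toks ++
          (if PySem.Chars.isdigit p.2 then [String.ofList [p.2]]
           else match pvWords.find? (fun wd => PySem.Chars.startswith (cs.drop p.1.toNat) wd.1.toList) with
             | some wd => [wd.2]
             | none => [])) := by
    funext toks p
    by_cases h : PySem.Chars.isdigit p.2 = true
    · simp [h]
    · simp only [h, if_false, Bool.false_eq_true]
      cases pvWords.find? (fun wd => PySem.Chars.startswith (cs.drop p.1.toNat) wd.1.toList) <;> simp
  rw [hfun, PySem.List.foldl_append_eq_flatMap, List.nil_append,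
    PySem.List.enumerate_eq_map_pyRange cs ' ',
    show PySem.List.len cs = ((cs.length : Nat) : Int) from rfl,
    PySem.List.pyRange_zero_natCast, List.map_map, List.flatMap_map,
    List.filterMap_eq_flatMap_toList]
  apply List.flatMap_congr
  intro j hj
  have hjn : j < cs.length := List.mem_range.mp hj
  simp only [Function.comp]
  have h1 : PySem.List.pyGetD cs ((j : Nat) : Int) ' ' = cs[j] := by
    rw [PySem.List.pyGetD_natCast]
    exact List.getD_eq_getElem cs ' ' hjn
  have h2 : ((j : Nat) : Int).toNat = j := Int.toNat_natCast j
  simp only [h1, h2]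
  have hpred : (fun wd => PySem.Chars.startswith (cs.drop j) wd.1.toList)
      = (fun (wd : String × String) => pvMatchAt cs j wd.1) := by
    funext wd; exact pvStarts_eq cs j wd.1
  by_cases hdg : PySem.Chars.isdigit cs[j] = true
  · rw [if_pos hdg]
    have hf := find?_none_of_digit cs j hjn hdg
    simp [pvTok, hf, hjn, hdg]
  · rw [if_neg hdg, hpred]
    cases hf : pvWords.find? (fun wd => pvMatchAt cs j wd.1) with
    | some wd => simp [pvTok, hf]
    | none => simp [pvTok, hf, hjn, hdg]

-- a word match somewhere means a token starts there
lemma tok_isSome_of_match (cs : List Char) (a : Nat) (wd : String × String)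
    (hmem : wd ∈ pvWords) (hm : pvMatchAt cs a wd.1 = true) : pvTok cs a ≠ none := by
  unfold pvTok
  cases hf : pvWords.find? (fun wd => pvMatchAt cs a wd.1) with
  | some wd' => simp
  | none => exact absurd hm (by simpa using List.find?_eq_none.mp hf wd hmem)

lemma tok_some_lt (cs : List Char) (i : Nat) (d : String)
    (h : pvTok cs i = some d) : i < cs.length := by
  unfold pvTok at h
  cases hf : pvWords.find? (fun wd => pvMatchAt cs i wd.1) with
  | some wd =>
    have hmem := List.mem_of_find?_eq_some hf
    have hm := List.find?_some hf
    have hL := (pvWords_len wd hmem).1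
    have := match_le cs i wd.1 (by omega) hm
    omega
  | none =>
    rw [hf] at h
    by_contra hn
    rw [dif_neg hn] at h
    simp at h

-- under maximality at i: every word match starts at or before i
lemma start_le_of_max (cs : List Char) (i : Nat)
    (hmax : ∀ k, i < k → pvTok cs k = none)
    (a : Nat) (wd : String × String) (hmem : wd ∈ pvWords)
    (hm : pvMatchAt cs a wd.1 = true) : a ≤ i := by
  by_contra hn
  exact tok_isSome_of_match cs a wd hmem hm (hmax a (by omega))

-- under maximality at i: no digit after i
lemma digit_le_of_max (cs : List Char) (i : Nat)
    (hmax : ∀ k, i < k → pvTok cs k = none)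
    (k : Nat) (hik : i < k) (hkn : k < cs.length) :
    PySem.Chars.isdigit cs[k] = false := by
  by_contra hn
  have hdg : PySem.Chars.isdigit cs[k] = true := by
    cases hb : PySem.Chars.isdigit cs[k] with
    | false => exact absurd hb hn
    | true => rfl
  have hf := find?_none_of_digit cs k hkn hdg
  have : pvTok cs k = some (String.ofList [cs[k]]) := by
    unfold pvTok; rw [hf]; simp [hkn, hdg]
  rw [hmax k hik] at this
  simp at this

-- last element of the token list = token at the greatest token start
lemma tokens_getLast? (cs : List Char) (d : String)
    (h : ((List.range cs.length).filterMap (pvTok cs)).getLast? = some d) :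
    ∃ i, i < cs.length ∧ pvTok cs i = some d ∧ ∀ k, i < k → pvTok cs k = none := by
  have H : ∀ n d, ((List.range n).filterMap (pvTok cs)).getLast? = some d →
      ∃ i, i < n ∧ pvTok cs i = some d ∧ ∀ k, i < k → k < n → pvTok cs k = none := by
    intro n
    induction n with
    | zero => intro d h; simp at h
    | succ n ih =>
      intro d h
      rw [List.range_succ, List.filterMap_append] at h
      cases hf : pvTok cs n with
      | some y =>
        have hfil : List.filterMap (pvTok cs) [n] = [y] := by simp [hf]
        rw [hfil, List.getLast?_concat] at h
        refine ⟨n, by omega, ?_, ?_⟩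
        · rw [hf, h]
        · intro k h1 h2; omega
      | none =>
        have hfil : List.filterMap (pvTok cs) [n] = [] := by simp [hf]
        rw [hfil, List.append_nil] at h
        obtain ⟨i, hilt, hd, hm⟩ := ih d h
        refine ⟨i, by omega, hd, ?_⟩
        intro k hk1 hk2
        rcases Nat.lt_succ_iff_lt_or_eq.mp hk2 with h' | rfl
        · exact hm k hk1 h'
        · exact hf
  obtain ⟨i, h1, h2, h3⟩ := H cs.length d h
  refine ⟨i, h1, h2, ?_⟩
  intro k hk
  by_cases hkn : k < cs.length
  · exact h3 k hk hkn
  · exact pvTok_none_of_ge cs k (by omega)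

-- A's backward loop returns exactly the last token
lemma pvALast_eq (cs : List Char) (i e : Nat) (d : String)
    (hi : pvTok cs i = some d) (hmax : ∀ k, i < k → pvTok cs k = none)
    (he : (∃ wd, pvWords.find? (fun wd => pvMatchAt cs i wd.1) = some wd ∧
             e = i + wd.1.toList.length - 1) ∨
          (pvWords.find? (fun wd => pvMatchAt cs i wd.1) = none ∧ e = i))
    (j : Nat) (hj : e ≤ j) (hjn : j < cs.length) :
    pvALast cs j = some d := by
  have hin : i < cs.length := tok_some_lt cs i d hi
  rcases he with ⟨wd, hf, he⟩ | ⟨hf, rfl⟩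
  · -- the token at i is the word wd
    have hmem := List.mem_of_find?_eq_some hf
    have hm := List.find?_some hf
    have hLb := pvWords_len wd hmem
    have hd : d = wd.2 := by
      unfold pvTok at hi; rw [hf] at hi; exact (Option.some.inj hi).symm
    have hiL : i + wd.1.toList.length ≤ cs.length := match_le cs i wd.1 (by omega) hm
    -- containment: any word match at a ≤ i whose occurrence reaches the token's end
    -- is the token itself
    have key_contain : ∀ a (wd' : String × String), wd' ∈ pvWords →
        pvMatchAt cs a wd'.1 = true → a ≤ i →
        i + wd.1.toList.length ≤ a + wd'.1.toList.length → a = i ∧ wd' = wd := by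
      intro a wd' hmem' hm' hai hend
      have hL' := pvWords_len wd' hmem'
      have hk : (i - a) + wd.1.toList.length ≤ wd'.1.toList.length := by omega
      have hslice : (wd'.1.toList.drop (i - a)).take wd.1.toList.length = wd.1.toList := by
        have hda : cs.drop a = wd'.1.toList ++ (cs.drop a).drop wd'.1.toList.length :=
          match_decomp cs a wd'.1 hm'
        have hmm : (cs.drop i).take wd.1.toList.length = wd.1.toList := by
          simpa [pvMatchAt] using hm
        have hdi : cs.drop i = (cs.drop a).drop (i - a) := by
          rw [List.drop_drop]; congr 1; omega
        have hb1 : i - a ≤ wd'.1.toList.length := by omega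
        have hb2 : wd.1.toList.length ≤ (wd'.1.toList.drop (i - a)).length := by
          rw [List.length_drop]; omega
        rw [hdi, hda, List.drop_append_of_le_length hb1,
          List.take_append_of_le_length hb2] at hmm
        exact hmm
      have hnn := pvWords_no_nest wd' wd hmem' hmem (i - a) hk hslice
      exact ⟨by omega, hnn.2⟩
    have key_noend : ∀ j' (hej : e < j') (hjn' : j' < cs.length),
        pvWords.find? (fun wd =>
          decide (j' + 1 ≥ wd.1.toList.length) && pvMatchAt cs (j' + 1 - wd.1.toList.length) wd.1) = none
        ∧ PySem.Chars.isdigit cs[j'] = false := by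
      intro j' hej hjn'
      refine ⟨?_, digit_le_of_max cs i hmax j' (by omega) hjn'⟩
      rw [List.find?_eq_none]
      intro wd' hmem' hq
      simp only [Bool.and_eq_true, decide_eq_true_eq] at hq
      obtain ⟨hge, hm'⟩ := hq
      have hL' := pvWords_len wd' hmem'
      have ha : j' + 1 - wd'.1.toList.length ≤ i :=
        start_le_of_max cs i hmax _ wd' hmem' hm'
      have hll : wd'.1.toList.length = wd'.1.length := by simp
      have hll2 : wd.1.toList.length = wd.1.length := by simp
      obtain ⟨hai, rfl⟩ := key_contain (j' + 1 - wd'.1.toList.length) wd' hmem' hm' ha (by omega)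
      omega
    have key_end : pvALast cs e = some d := by
      have hen : e < cs.length := by omega
      have hgd : cs.getD e ' ' = cs[e] := List.getD_eq_getElem cs ' ' hen
      have hq : (decide (e + 1 ≥ wd.1.toList.length) &&
          pvMatchAt cs (e + 1 - wd.1.toList.length) wd.1) = true := by
        have h1 : e + 1 - wd.1.toList.length = i := by omega
        rw [h1, hm]
        simp only [Bool.and_true, decide_eq_true_eq]
        omega
      cases hfq : pvWords.find? (fun wd =>
          decide (e + 1 ≥ wd.1.toList.length) && pvMatchAt cs (e + 1 - wd.1.toList.length) wd.1) with
      | none => exact absurd hq (List.find?_eq_none.mp hfq wd hmem)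
      | some wd'' =>
        have hmem'' := List.mem_of_find?_eq_some hfq
        have hq'' := List.find?_some hfq
        simp only [Bool.and_eq_true, decide_eq_true_eq] at hq''
        obtain ⟨hge'', hm''⟩ := hq''
        have hLb'' := pvWords_len wd'' hmem''
        have ha'' : e + 1 - wd''.1.toList.length ≤ i :=
          start_le_of_max cs i hmax _ wd'' hmem'' hm''
        have hll : wd''.1.toList.length = wd''.1.length := by simp
        have hll2 : wd.1.toList.length = wd.1.length := by simp
        have := key_contain (e + 1 - wd''.1.toList.length) wd'' hmem'' hm'' ha'' (by omega)
        rw [pvALast.eq_def, hfq, this.2, hd]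
    clear hi hm
    induction j with
    | zero => exact (by omega : e = 0) ▸ key_end
    | succ j ih =>
      by_cases hje : e = j + 1
      · exact hje ▸ key_end
      · have hstep := key_noend (j + 1) (by omega) hjn
        have hgd : cs.getD (j + 1) ' ' = cs[j + 1] := List.getD_eq_getElem cs ' ' hjn
        rw [pvALast.eq_def, hstep.1, hgd, hstep.2]
        simp only [Bool.false_eq_true, if_false]
        exact ih (by omega) (by omega)
  · -- the token at e is the digit cs[e]
    have hdg : PySem.Chars.isdigit cs[e] = true := by
      unfold pvTok at hi
      rw [hf, dif_pos hin] at hi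
      by_contra hnd
      simp only [Bool.not_eq_true] at hnd
      rw [hnd] at hi
      simp at hi
    have hd : d = String.ofList [cs[e]] := by
      unfold pvTok at hi
      rw [hf, dif_pos hin, if_pos hdg] at hi
      exact (Option.some.inj hi).symm
    -- no word ends at or after e, and no digit sits after e
    have key_noend : ∀ j', e ≤ j' → j' < cs.length →
        pvWords.find? (fun wd =>
          decide (j' + 1 ≥ wd.1.toList.length) && pvMatchAt cs (j' + 1 - wd.1.toList.length) wd.1) = none := by
      intro j' hej hjn'
      rw [List.find?_eq_none]
      intro wd' hmem' hq
      simp only [Bool.and_eq_true, decide_eq_true_eq] at hq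
      obtain ⟨hge, hm'⟩ := hq
      have hL' := pvWords_len wd' hmem'
      have ha : j' + 1 - wd'.1.toList.length ≤ e :=
        start_le_of_max cs e hmax _ wd' hmem' hm'
      have hia : e - (j' + 1 - wd'.1.toList.length) < wd'.1.toList.length := by omega
      have hc := match_char cs _ wd'.1 hm' _ hia (by omega)
      have heq : cs[(j' + 1 - wd'.1.toList.length) + (e - (j' + 1 - wd'.1.toList.length))] = cs[e] := by
        congr 1; omega
      rw [heq] at hc
      have := pvWords_no_digit wd' hmem' _ hc
      rw [hdg] at this
      exact absurd this (by simp)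
    have key_end : pvALast cs e = some d := by
      have hgd : cs.getD e ' ' = cs[e] := List.getD_eq_getElem cs ' ' (by omega)
      rw [pvALast.eq_def, key_noend e (by omega) (by omega), hgd]
      rw [if_pos hdg, ← hd]
    clear hi
    induction j with
    | zero => exact (by omega : e = 0) ▸ key_end
    | succ j ih =>
      by_cases hje : e = j + 1
      · exact hje ▸ key_end
      · have hgd : cs.getD (j + 1) ' ' = cs[j + 1] := List.getD_eq_getElem cs ' ' hjn
        rw [pvALast.eq_def, key_noend (j + 1) (by omega) hjn, hgd,
          digit_le_of_max cs e hmax (j + 1) (by omega) hjn]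
        simp only [Bool.false_eq_true, if_false]
        exact ih (by omega) (by omega)

-- ===== VERDICT (by name: the statement is the Claim_ definition above) =====
set_option maxHeartbeats 1000000 in
theorem find_and_combine_first_last_numbers_spec : Claim_equal_find_and_combine_first_last_numbers := by
  unfold Claim_equal_find_and_combine_first_last_numbers
  intro s _
  show find_and_combine_first_last_numbers s = find_and_combine_first_last_numbers_alt s
  simp only [find_and_combine_first_last_numbers, find_and_combine_first_last_numbers_alt]
  rw [pvB_tokens, pvAFirst_eq, Nat.sub_zero, ← List.range_eq_range']
  cases hT : (List.range s.toList.length).filterMap (pvTok s.toList) with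
  | nil => rfl
  | cons t rest =>
    have hne : (t :: rest) ≠ [] := by simp
    obtain ⟨l, hlast⟩ : ∃ l, (t :: rest).getLast? = some l :=
      Option.ne_none_iff_exists'.mp (by simp)
    obtain ⟨i, hilt, htok, hmax⟩ := tokens_getLast? s.toList l (by rw [hT, hlast])
    have hn0 : ¬ s.toList.length = 0 := by omega
    have hee : ∃ e, ((∃ wd, pvWords.find? (fun wd => pvMatchAt s.toList i wd.1) = some wd ∧
          e = i + wd.1.toList.length - 1) ∨
        (pvWords.find? (fun wd => pvMatchAt s.toList i wd.1) = none ∧ e = i)) ∧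
        e ≤ s.toList.length - 1 := by
      cases hf : pvWords.find? (fun wd => pvMatchAt s.toList i wd.1) with
      | some wd =>
        refine ⟨i + wd.1.toList.length - 1, Or.inl ⟨wd, rfl, rfl⟩, ?_⟩
        have hL := (pvWords_len wd (List.mem_of_find?_eq_some hf)).1
        have := match_le s.toList i wd.1 (by omega) (List.find?_some (p := fun wd : String × String => pvMatchAt s.toList i wd.1) hf)
        omega
      | none => exact ⟨i, Or.inr ⟨rfl, rfl⟩, by omega⟩
    obtain ⟨e, hedis, hele⟩ := hee
    have hlastA := pvALast_eq s.toList i e l htok hmax hedis (s.toList.length - 1) hele (by omega)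
    have hgl : (t :: rest).getLast (by simp) = l := by
      have h2 := List.getLast?_eq_some_getLast (l := t :: rest) (by simp)
      rw [hlast] at h2
      exact (Option.some.inj h2).symm
    rw [if_neg hn0, hlastA]
    simp [hgl]
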